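-- pv_equiv track=rewrite | github.com/TdotA/Python_for_CS1 | Exam_2019/fence.py | proper_limited
-- ===== SOURCE A (Python) =====
-- def all_colorings(n , c):
--     if n == 0:
--         return ['']
--     l = []
--     l_rest = all_colorings(n-1, c)
--     for color in c:
--         for rest in l_rest:
--             l.append(color + rest)
--     return l
--
-- def is_valid(s):
--     for i in range(len(s)-1):
--         if s[i] == s[i+1]:
--             return False
--     return True
--
-- def proper_colorings(n,c):
--     l = []
--     for coloring in all_colorings(n,c):
--         if is_valid(coloring):
--             l.append(coloring)
--     return l
--
-- def is_limited(s, c):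
--     count= {}
--     for x in s:
--         if not x in count:
--             count[x] = 1
--         else:
--             count[x] = count[x] + 1
--     for color, limit in c:
--         if count.get(color, 0) > limit:
--             return False
--     return True
--
-- def proper_limited(n, c):
--     c2 = [p[0] for p in c]
--     colorings = proper_colorings(n,c2)
--     l = []
--     for coloring in colorings:
--         if is_limited(coloring, c):
--             l.append(coloring)
--     return l
-- ===== SOURCE B (Python) =====
-- def proper_limited(n, c):
--     # Breadth-first backtracking: extend only already-proper colorings, pruning
--     # any extension whose newly added piece creates an equal adjacent pair.
--     names = [p[0] for p in c]
--
--     def ok(s):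
--         return all(x != y for x, y in zip(s, s[1:]))
--
--     level = ['']
--     for _ in range(n):
--         level = [name + rest for name in names for rest in level
--                  if ok(name + rest[:1])]
--
--     result = []
--     for s in level:
--         counts = {}
--         for x in s:
--             counts[x] = counts.get(x, 0) + 1
--         if all(counts.get(color, 0) <= limit for color, limit in c):
--             result.append(s)
--     return result
-- ===== Notes on version B (the rewrite author's own statement) =====
-- stated objective: faster
-- what changed: B replaces A's generate-all-c^n-strings-then-filter recursion by iterative level-by-level backtracking that only extends already-proper colorings (an extension is kept only if the newly added name plus the first old character is adjacent-distinct), then checks per-color limits with a single get-based count dict; Pre_ excludes only n < 0, where A recurses without reaching its base case.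
import Mathlib
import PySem

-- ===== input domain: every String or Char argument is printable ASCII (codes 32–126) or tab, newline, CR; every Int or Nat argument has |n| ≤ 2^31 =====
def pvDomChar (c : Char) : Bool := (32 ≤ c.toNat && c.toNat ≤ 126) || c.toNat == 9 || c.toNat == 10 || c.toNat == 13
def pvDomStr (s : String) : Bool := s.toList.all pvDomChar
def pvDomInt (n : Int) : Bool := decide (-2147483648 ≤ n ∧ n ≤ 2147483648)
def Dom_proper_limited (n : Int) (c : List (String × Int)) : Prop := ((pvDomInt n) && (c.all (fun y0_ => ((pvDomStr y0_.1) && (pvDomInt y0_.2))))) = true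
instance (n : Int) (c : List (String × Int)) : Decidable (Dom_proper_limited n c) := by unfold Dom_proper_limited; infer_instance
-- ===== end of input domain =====

-- B replaces A's generate-all-then-filter recursion by iterative level-by-level backtracking
-- that only extends already-proper colorings, then a single count-dict limit check.

-- ===== PORT A =====
-- all_colorings(n, c): recursion on n (Pre_ gives 0 ≤ n, so n is used as a Nat)
def pvAllColorings (c : List (List Char)) : Nat → List (List Char)
  | 0 => [[]]
  | Nat.succ m =>
    let lrest := pvAllColorings c m
    c.foldl (fun l color => lrest.foldl (fun l rest => l ++ [color ++ rest]) l) []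

-- is_valid(s): the early-return loop over range(len(s)-1) as a Bool `all`
def pvIsValid (s : List Char) : Bool :=
  (PySem.List.pyRange 0 ((s.length : Int) - 1) 1).all
    (fun i => !(PySem.List.pyGet? s i == PySem.List.pyGet? s (i + 1)))

def pvProperColorings (n : Nat) (c : List (List Char)) : List (List Char) :=
  (pvAllColorings c n).foldl
    (fun l coloring => if pvIsValid coloring then l ++ [coloring] else l) []

-- is_limited(s, c): Python iterates s as 1-character strings, so the dict keys are
-- singleton lists [x]
def pvIsLimited (s : List Char) (c : List (List Char × Int)) : Bool :=
  let count := s.foldl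
    (fun d x => if !(d.contains [x]) then d.insert [x] 1 else d.insert [x] (d.getD [x] 0 + 1))
    (PySem.Dict.empty)
  c.all (fun p => !(decide (count.getD p.1 0 > p.2)))

def proper_limited (n : Int) (c : List (String × Int)) : List String :=
  let c2 := c.map (fun p => p.1.toList)
  let colorings := pvProperColorings n.toNat c2
  (colorings.foldl
    (fun l coloring =>
      if pvIsLimited coloring (c.map (fun p => (p.1.toList, p.2))) then l ++ [coloring] else l)
    []).map String.mk

-- ===== PORT B =====
-- ok(s): all(x != y for x, y in zip(s, s[1:]))
def pvOk (s : List Char) : Bool := (s.zip (s.drop 1)).all (fun p => p.1 != p.2)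

-- the level loop: `for _ in range(n): level = [name + rest for name in names
--   for rest in level if ok(name + rest[:1])]` (iterated n times)
def pvLevel (names : List (List Char)) : Nat → List (List Char)
  | 0 => [[]]
  | Nat.succ m =>
    names.flatMap (fun name =>
      ((pvLevel names m).filter (fun rest => pvOk (name ++ rest.take 1))).map (name ++ ·))

-- counts = {}; for x in s: counts[x] = counts.get(x, 0) + 1
def pvCounts (s : List Char) : PySem.Dict (List Char) Int :=
  s.foldl (fun d x => d.insert [x] (d.getD [x] 0 + 1)) PySem.Dict.empty

def proper_limited_alt (n : Int) (c : List (String × Int)) : List String :=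
  let names := c.map (fun p => p.1.toList)
  ((pvLevel names n.toNat).foldl
    (fun result s =>
      if c.all (fun p => decide ((pvCounts s).getD p.1.toList 0 ≤ p.2))
      then result ++ [s] else result)
    []).map String.mk

-- ===== PRECONDITION & SPEC =====
-- Pre_ excludes only n < 0, where Python A recurses without ever reaching the base case.
def Pre_proper_limited (n : Int) (c : List (String × Int)) : Prop := 0 ≤ n
instance (n : Int) (c : List (String × Int)) : Decidable (Pre_proper_limited n c) := by
  unfold Pre_proper_limited; infer_instance

def pvWitness_proper_limited : Int × (List (String × Int)) := (3, [("a", 1), ("b", 2)])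

def Spec_proper_limited (n : Int) (c : List (String × Int)) (out : List String) : Prop :=
  out = proper_limited_alt n c
instance (n : Int) (c : List (String × Int)) (out : List String) :
    Decidable (Spec_proper_limited n c out) := by unfold Spec_proper_limited; infer_instance

-- ===== CLAIM (what is proved, stated in full; the proofs are below) =====
def Claim_equal_proper_limited : Prop := ∀ (n : Int) (c : List (String × Int)),
  Dom_proper_limited n c → Pre_proper_limited n c →
    Spec_proper_limited n c (proper_limited n c)

-- ===== LEMMAS AND PROOFS =====

-- loop shape: the append-if fold is a filter
theorem pvFoldlFilter {α : Type} (p : α → Bool) (l a : List α) :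
    l.foldl (fun acc x => if p x then acc ++ [x] else acc) a = a ++ l.filter p := by
  induction l generalizing a with
  | nil => simp
  | cons x t ih => by_cases h : p x <;> simp [h, ih]

theorem pvGet_neg_one (l : List Char) (h : l ≠ []) : PySem.List.pyGet? l (-1) = l.getLast? := by
  have hl : 0 < l.length := List.length_pos_iff.mpr h
  simp only [PySem.List.pyGet?, PySem.List.pyIdx?]
  rw [if_neg (by omega), if_pos (by omega : -(l.length : Int) ≤ -1)]
  simp [List.getLast?_eq_getElem?]

theorem pvIsValid_iff (s : List Char) : pvIsValid s = true ↔ s.IsChain (· ≠ ·) := by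
  unfold pvIsValid
  rcases s with _ | ⟨a, t⟩
  · simp
  · have hlen : ((a :: t).length : Int) - 1 = ((a :: t).length - 1 : Nat) := by simp
    rw [hlen, PySem.List.pyRange_zero_natCast, List.all_map]
    rw [List.isChain_iff_getElem]
    simp only [List.all_eq_true, Function.comp, List.mem_range]
    have cast1 : ∀ k : Nat, ((k : Int) + 1) = ((k + 1 : Nat) : Int) := by
      intro k; push_cast; ring
    constructor
    · intro h i hi
      have := h i (by omega)
      rw [cast1, PySem.List.pyGet?_natCast, PySem.List.pyGet?_natCast,
        List.getElem?_eq_getElem (Nat.lt_of_succ_lt hi), List.getElem?_eq_getElem hi] at this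
      simpa using this
    · intro h k hk
      have hk' : k + 1 < (a :: t).length := by omega
      rw [cast1, PySem.List.pyGet?_natCast, PySem.List.pyGet?_natCast,
        List.getElem?_eq_getElem (Nat.lt_of_succ_lt hk'), List.getElem?_eq_getElem hk']
      simpa using h k hk'

theorem pvOk_iff (s : List Char) : pvOk s = true ↔ s.IsChain (· ≠ ·) := by
  unfold pvOk
  induction s with
  | nil => simp
  | cons a t ih =>
    rcases t with _ | ⟨b, t2⟩
    · simp
    · simp only [List.drop_succ_cons, List.drop_zero, List.zip_cons_cons, List.all_cons,
        Bool.and_eq_true, List.isChain_cons_cons] at *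
      rw [ih]
      simp [and_comm]

theorem pvOk_eq_isValid (s : List Char) : pvOk s = pvIsValid s := by
  rw [Bool.eq_iff_iff, pvOk_iff, pvIsValid_iff]

-- the adjacency condition at the junction between a name and the rest
def pvJunctionBad (color rest : List Char) : Bool :=
  !color.isEmpty && !rest.isEmpty
    && (PySem.List.pyGet? color (-1) == PySem.List.pyGet? rest 0)

theorem pvJunction_iff (color rest : List Char) :
    (!pvJunctionBad color rest) = true ↔ ∀ x ∈ color.getLast?, ∀ y ∈ rest.head?, x ≠ y := by
  unfold pvJunctionBad
  rcases color with _ | ⟨a, tc⟩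
  · simp
  · rcases rest with _ | ⟨b, tr⟩
    · simp
    · rw [pvGet_neg_one _ (by simp)]
      have h0 : PySem.List.pyGet? (b :: tr) 0 = some b := by
        simpa using PySem.List.pyGet?_natCast (b :: tr) 0
      rw [h0]
      rcases hl : (a :: tc).getLast? with _ | y
      · simp at hl
      · simp [hl]

theorem pvValid_append (color rest : List Char) :
    pvIsValid (color ++ rest)
      = (pvIsValid color && !pvJunctionBad color rest && pvIsValid rest) := by
  rw [Bool.eq_iff_iff]
  simp only [Bool.and_eq_true, pvIsValid_iff, List.isChain_append, pvJunction_iff]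
  tauto

-- B's pruning test at a junction: the new name plus the first old character
theorem pvOk_take1 (name rest : List Char) :
    pvOk (name ++ rest.take 1) = (pvIsValid name && !pvJunctionBad name rest) := by
  rw [pvOk_eq_isValid, pvValid_append]
  have h1 : pvIsValid (rest.take 1) = true := by
    rcases rest with _ | ⟨b, t⟩ <;> simp [pvIsValid_iff]
  have h2 : pvJunctionBad name (rest.take 1) = pvJunctionBad name rest := by
    unfold pvJunctionBad
    rcases rest with _ | ⟨b, t⟩
    · simp
    · simp [List.take, PySem.List.pyGet?, PySem.List.pyIdx?]
  rw [h1, h2]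
  simp

theorem pvAll_succ (c : List (List Char)) (m : Nat) :
    pvAllColorings c (m + 1)
      = c.flatMap (fun color => (pvAllColorings c m).map (color ++ ·)) := by
  simp only [pvAllColorings, PySem.List.foldl_append_singleton_eq_map]
  exact PySem.List.foldl_append_eq_flatMap _ c []

-- B's backtracking produces exactly A's proper colorings, in A's order
theorem pvLevel_eq_filter (names : List (List Char)) (m : Nat) :
    pvLevel names m = (pvAllColorings names m).filter pvIsValid := by
  induction m with
  | zero =>
    show [[]] = List.filter pvIsValid [[]]
    have : pvIsValid [] = true := by decide
    simp [this]
  | succ m ih =>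
    rw [pvAll_succ, List.filter_flatMap]
    show names.flatMap _ = _
    apply List.flatMap_congr
    intro name _
    rw [List.filter_map, ih, List.filter_filter]
    congr 1
    apply List.filter_congr
    intro rest _
    show (pvOk (name ++ rest.take 1) && pvIsValid rest) = (pvIsValid ∘ (name ++ ·)) rest
    rw [pvOk_take1]
    show _ = pvIsValid (name ++ rest)
    rw [pvValid_append]

-- A's counting dict is B's counting dict
theorem pvCountDict_eq (s : List Char) :
    s.foldl (fun d x => if !(d.contains [x]) then d.insert [x] 1
        else d.insert [x] (d.getD [x] 0 + 1))
        (PySem.Dict.empty (κ := List Char) (ν := Int))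
      = pvCounts s := by
  unfold pvCounts
  congr 1
  funext d x
  by_cases h : d.contains [x]
  · simp [h]
  · have h' : d.contains [x] = false := by simpa using h
    simp [h', PySem.Dict.getD_of_not_contains d 0 h']

-- A's dict-based limit check agrees with B's
theorem pvLimited_eq (s : List Char) (c : List (String × Int)) :
    pvIsLimited s (c.map (fun p => (p.1.toList, p.2)))
      = c.all (fun p => decide ((pvCounts s).getD p.1.toList 0 ≤ p.2)) := by
  unfold pvIsLimited
  rw [pvCountDict_eq, List.all_map]
  congr 1
  funext p
  simp only [Function.comp_apply]
  rw [Bool.eq_iff_iff]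
  simp

-- ===== VERDICT (by name: the statement is the Claim_ definition above) =====
theorem proper_limited_spec : Claim_equal_proper_limited := by
  intro n c _ _
  unfold Spec_proper_limited proper_limited proper_limited_alt pvProperColorings
  simp only [pvFoldlFilter, List.nil_append, pvLevel_eq_filter, pvLimited_eq]
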